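-- pv_equiv track=rewrite | github.com/cfevrius/CodingBat | source/array3.py | max_mirror
-- ===== SOURCE A (Python) =====
-- def max_mirror(nums):
--     all_contiguous_at_index = lambda index: [nums[index:index+i]
--                                              for i in range(1, len(nums) - index + 1)]
--     '''
--     nums = [1, 2, 3]
--     all_contiguous_at_index(0) => [[1], [1, 2], [1, 2, 3]]
--     all_contiguous_at_index(1) => [[2], [2, 3]]
--     all_contiguous_at_index(2) => [[3]]
--     '''
--     list_to_str = lambda list: ''.join(str(num) for num in list)
--     is_sublist_in_list = lambda sublist: list_to_str(sublist) in list_to_str(nums)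
--     len_of_all_mirrors = [len(sequence) if is_sublist_in_list(reversed(sequence)) else 0
--                           for i,_ in enumerate(nums)
--                           for sequence in all_contiguous_at_index(i)]
--     return max(len_of_all_mirrors, default=0)
-- ===== SOURCE B (Python) =====
-- def max_mirror(nums):
--     full = ''.join(str(x) for x in nums)
--     n = len(nums)
--     for L in range(n, 0, -1):
--         for i in range(n - L + 1):
--             rev = ''.join(str(x) for x in reversed(nums[i:i+L]))
--             if rev in full:
--                 return L
--     return 0
-- ===== Notes on version B (the rewrite author's own statement) =====
-- stated objective: alternative
-- what changed: Replaces A's flat enumerate-all-subarrays comprehension followed by max(..., default=0) with a longest-first search: loop L from n down to 1 and return the first L whose reversed slice string occurs in the full string, short-circuiting as soon as the answer is found.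
import Mathlib
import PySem

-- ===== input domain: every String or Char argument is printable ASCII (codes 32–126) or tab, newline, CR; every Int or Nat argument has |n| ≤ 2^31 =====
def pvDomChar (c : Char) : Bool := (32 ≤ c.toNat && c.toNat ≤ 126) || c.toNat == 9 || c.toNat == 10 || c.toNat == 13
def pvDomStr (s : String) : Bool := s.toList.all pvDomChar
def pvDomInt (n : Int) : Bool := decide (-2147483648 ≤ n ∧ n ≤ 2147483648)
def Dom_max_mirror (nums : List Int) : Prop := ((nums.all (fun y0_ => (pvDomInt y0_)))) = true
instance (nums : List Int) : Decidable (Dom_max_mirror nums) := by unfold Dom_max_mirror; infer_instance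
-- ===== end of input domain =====

-- B changes the decomposition: a longest-length-first search with early return instead of
-- enumerating every subarray and taking max(..., default=0); same return value everywhere.

-- ''.join(str(x) for x in xs)  (shared by both Pythons, literally)
def pvLts (xs : List Int) : List Char :=
  PySem.Chars.join [] (xs.map PySem.Int.toChars)

-- ===== PORT A =====
-- A: list of (len if reversed-slice-string in full-string else 0) over every (i, i2), then max with default 0.
-- 'for i,_ in enumerate(nums)' → indices 0..n-1; 'range(1, len(nums)-i+1)' → i2 = j+1 for j < n-i.
def max_mirror (nums : List Int) : Int :=
  let lens := (List.range nums.length).flatMap (fun (i : Nat) =>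
    (List.range (nums.length - i)).map (fun (j : Nat) =>
      let seq := PySem.List.slice nums (some (i : Int)) (some ((i : Int) + ((j : Int) + 1)))
      if PySem.Chars.isIn (pvLts seq.reverse) (pvLts nums) then (seq.length : Int) else 0))
  match PySem.List.max? lens (fun x => x) with
  | some m => m
  | none => 0

-- ===== PORT B =====
-- 'for L in range(n, 0, -1)' with early 'return L' → structural recursion on L;
-- the inner 'for i in range(n-L+1): … if rev in full: return L' → List.any.
def mmLoop (nums : List Int) (full : List Char) : Nat → Int
  | 0 => 0
  | L + 1 =>
    if (List.range (nums.length - (L + 1) + 1)).any (fun i =>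
        PySem.Chars.isIn
          (pvLts (PySem.List.slice nums (some (i : Int)) (some ((i : Int) + ((L : Int) + 1)))).reverse)
          full)
    then ((L : Int) + 1)
    else mmLoop nums full L

def max_mirror_alt (nums : List Int) : Int :=
  mmLoop nums (pvLts nums) nums.length

-- ===== PRECONDITION & SPEC =====
def Spec_max_mirror (nums : List Int) (out : Int) : Prop := out = max_mirror_alt nums
instance (nums : List Int) (out : Int) : Decidable (Spec_max_mirror nums out) := by unfold Spec_max_mirror; infer_instance

-- ===== CLAIM (what is proved, stated in full; the proofs are below) =====
def Claim_equal_max_mirror : Prop := ∀ (nums : List Int), Dom_max_mirror nums → Spec_max_mirror nums (max_mirror nums)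

-- ===== LEMMAS AND PROOFS =====

-- the reversed-slice-substring test, slice normalised to drop/take
def mmC (nums : List Int) (i L : Nat) : Bool :=
  PySem.Chars.isIn (pvLts (((nums.drop i).take L).reverse)) (pvLts nums)

-- "some length-L subarray mirrors"
def mmP (nums : List Int) (L : Nat) : Prop :=
  ∃ i, i + L ≤ nums.length ∧ mmC nums i L = true

lemma mm_slice_norm (nums : List Int) (i L : Nat) :
    PySem.List.slice nums (some (i : Int)) (some ((i : Int) + ((L : Int) + 1)))
      = (nums.drop i).take (L + 1) := by
  have h : (i : Int) + ((L : Int) + 1) = (i : Int) + ((L + 1 : Nat) : Int) := by push_cast; ring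
  rw [h, PySem.List.slice_natCast_add]

lemma mmLoop_nonneg (nums : List Int) (full : List Char) (L : Nat) :
    0 ≤ mmLoop nums full L := by
  induction L with
  | zero => simp [mmLoop]
  | succ L ih =>
    simp only [mmLoop]
    split
    · positivity
    · exact ih

lemma mmLoop_ge (nums : List Int) (L L' : Nat)
    (hL'L : L' ≤ L) (hLn : L ≤ nums.length) (h1 : 1 ≤ L') (hP : mmP nums L') :
    (L' : Int) ≤ mmLoop nums (pvLts nums) L := by
  induction L with
  | zero => omega
  | succ L ih =>
    simp only [mmLoop]
    split
    · exact_mod_cast Nat.cast_le.mpr hL'L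
    · rename_i hany
      rcases Nat.lt_or_ge L' (L + 1) with hlt | hge
      · exact ih (by omega) (by omega)
      · -- L' = L + 1 : the 'any' must have fired, contradiction
        exfalso
        have hEq : L' = L + 1 := by omega
        obtain ⟨i, hib, hc⟩ := hP
        apply hany
        rw [List.any_eq_true]
        refine ⟨i, List.mem_range.mpr (by omega), ?_⟩
        rw [mm_slice_norm]
        subst hEq
        exact hc

lemma mmLoop_cases (nums : List Int) (L : Nat) (hLn : L ≤ nums.length) :
    mmLoop nums (pvLts nums) L = 0 ∨
      ∃ L', 1 ≤ L' ∧ L' ≤ L ∧ mmLoop nums (pvLts nums) L = (L' : Int) ∧ mmP nums L' := by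
  induction L with
  | zero => left; rfl
  | succ L ih =>
    simp only [mmLoop]
    split
    · rename_i hany
      right
      refine ⟨L + 1, by omega, le_refl _, by push_cast; ring, ?_⟩
      rw [List.any_eq_true] at hany
      obtain ⟨i, hi, hc⟩ := hany
      rw [List.mem_range] at hi
      rw [mm_slice_norm] at hc
      exact ⟨i, by omega, hc⟩
    · rcases ih (by omega) with h0 | ⟨L', h1, h2, h3, h4⟩
      · left; exact h0
      · right; exact ⟨L', h1, by omega, h3, h4⟩

-- membership description of A's list of candidate values
lemma mem_lens_iff (nums : List Int) (x : Int) :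
    (x ∈ (List.range nums.length).flatMap (fun (i : Nat) =>
      (List.range (nums.length - i)).map (fun (j : Nat) =>
        let seq := PySem.List.slice nums (some (i : Int)) (some ((i : Int) + ((j : Int) + 1)))
        if PySem.Chars.isIn (pvLts seq.reverse) (pvLts nums) then (seq.length : Int) else 0)))
      ↔ ∃ i j, i < nums.length ∧ j < nums.length - i ∧
          x = (if mmC nums i (j + 1) then (((nums.drop i).take (j + 1)).length : Int) else 0) := by
  simp only [List.mem_flatMap, List.mem_map, List.mem_range]
  constructor
  · rintro ⟨i, hi, ⟨j, hj, rfl⟩⟩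
    exact ⟨i, j, hi, hj, by simp only [mm_slice_norm]; rfl⟩
  · rintro ⟨i, j, hi, hj, rfl⟩
    exact ⟨i, hi, ⟨j, hj, by simp only [mm_slice_norm]; rfl⟩⟩

lemma take_drop_len (nums : List Int) (i L : Nat) (h : i + L ≤ nums.length) :
    ((nums.drop i).take L).length = L := by
  simp [List.length_take, List.length_drop]
  omega

theorem max_mirror_spec : Claim_equal_max_mirror := by
  intro nums _
  unfold Spec_max_mirror max_mirror max_mirror_alt
  set n := nums.length with hn
  set B := mmLoop nums (pvLts nums) n with hB
  set lens := (List.range nums.length).flatMap (fun (i : Nat) =>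
    (List.range (nums.length - i)).map (fun (j : Nat) =>
      let seq := PySem.List.slice nums (some (i : Int)) (some ((i : Int) + ((j : Int) + 1)))
      if PySem.Chars.isIn (pvLts seq.reverse) (pvLts nums) then (seq.length : Int) else 0)) with hlens
  -- every candidate value is ≤ B and ≥ 0
  have hle : ∀ x ∈ lens, x ≤ B := by
    intro x hx
    rw [hlens, mem_lens_iff] at hx
    obtain ⟨i, j, hi, hj, rfl⟩ := hx
    split
    · rename_i hc
      rw [take_drop_len nums i (j + 1) (by omega)]
      exact mmLoop_ge nums n (j + 1) (by omega) (le_refl _) (by omega)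
        ⟨i, by omega, hc⟩
    · exact mmLoop_nonneg _ _ _
  have hge0 : ∀ x ∈ lens, 0 ≤ x := by
    intro x hx
    rw [hlens, mem_lens_iff] at hx
    obtain ⟨i, j, hi, hj, rfl⟩ := hx
    split <;> positivity
  rcases Nat.eq_zero_or_pos n with h0 | hpos
  · -- empty input
    have hnil : nums = [] := List.eq_nil_of_length_eq_zero h0
    subst hnil
    rfl
  · -- nonempty: lens is nonempty
    have hne : lens ≠ [] := by
      have : (if mmC nums 0 (0 + 1) then (((nums.drop 0).take (0 + 1)).length : Int) else 0) ∈ lens := by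
        rw [hlens, mem_lens_iff]
        exact ⟨0, 0, by omega, by omega, rfl⟩
      intro h; rw [h] at this; exact (List.not_mem_nil) this
    obtain ⟨m, hm⟩ : ∃ m, PySem.List.max? lens (fun x => x) = some m := by
      cases hmx : PySem.List.max? lens (fun x => x) with
      | none => exact absurd ((PySem.List.max?_eq_none_iff lens (fun x => x)).mp hmx) hne
      | some m => exact ⟨m, rfl⟩
    show (match PySem.List.max? lens (fun x => x) with | some m => m | none => 0) = B
    rw [hm]
    show m = B
    have hmmem : m ∈ lens := PySem.List.max?_mem hm
    have hmax : ∀ y ∈ lens, y ≤ m := fun y hy => PySem.List.max?_isMax hm y hy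
    rcases mmLoop_cases nums n (le_refl _) with hB0 | ⟨L', h1, h2, h3, i, hib, hc⟩
    · -- B = 0: all elements are 0
      rw [← hB] at hB0
      rw [hB0]
      have h1 := hle m hmmem
      have h2 := hge0 m hmmem
      omega
    · -- B = L' which occurs in lens
      rw [← hB] at h3
      have hmemL : (L' : Int) ∈ lens := by
        rw [hlens, mem_lens_iff]
        refine ⟨i, L' - 1, by omega, by omega, ?_⟩
        have hL : L' - 1 + 1 = L' := by omega
        rw [hL, take_drop_len nums i L' hib, if_pos hc]
      rw [h3]
      exact le_antisymm (h3 ▸ hle m hmmem) (hmax _ hmemL)
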